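-- pv_equiv track=rewrite | github.com/justinxu421/advent | advent_2024/day1.py | pb
-- ===== SOURCE A (Python) =====
-- from collections import Counter, defaultdict
--
-- def pb(lst):
--     left = [int(x[0]) for x in lst]
--     right = [int(x[1]) for x in lst]
--     right_counter = Counter(right)
--
--     total = 0
--     for num in left:
--         total += num * right_counter[num]
--     return total
-- ===== SOURCE B (Python) =====
-- def pb(lst):
--     left = sorted(int(x[0]) for x in lst)
--     right = sorted(int(x[1]) for x in lst)
--     total = 0
--     i = j = 0
--     n, m = len(left), len(right)
--     while i < n and j < m:
--         if left[i] < right[j]: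
--             i += 1
--         elif right[j] < left[i]:
--             j += 1
--         else:
--             k = j
--             while k < m and right[k] == left[i]:
--                 k += 1
--             total += left[i] * (k - j)
--             i += 1
--     return total
-- ===== Notes on version B (the rewrite author's own statement) =====
-- stated objective: alternative
-- what changed: B sorts both columns and computes the score with a two-pointer merge sweep over the sorted lists (measuring each matching run in the right column), instead of A's Counter hash table lookups.
import Mathlib
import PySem

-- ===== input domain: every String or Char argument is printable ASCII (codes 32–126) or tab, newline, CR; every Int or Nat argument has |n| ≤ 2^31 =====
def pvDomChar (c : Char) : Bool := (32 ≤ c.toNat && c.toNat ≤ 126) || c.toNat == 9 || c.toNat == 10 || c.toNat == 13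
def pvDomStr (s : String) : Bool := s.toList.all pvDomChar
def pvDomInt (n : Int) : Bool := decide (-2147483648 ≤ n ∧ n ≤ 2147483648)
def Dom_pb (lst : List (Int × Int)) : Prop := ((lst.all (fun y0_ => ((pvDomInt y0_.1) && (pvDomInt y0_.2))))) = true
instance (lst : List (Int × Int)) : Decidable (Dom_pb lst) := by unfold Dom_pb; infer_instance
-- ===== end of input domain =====

-- B sorts both columns and does a two-pointer merge sweep (measuring each matching run
-- in the right column) instead of A's Counter hash lookups — an alternative algorithm.

-- ===== PORT A =====
def pb (lst : List (Int × Int)) : Int :=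
  let left := lst.map (fun x => x.1)
  let right := lst.map (fun x => x.2)
  let right_counter := PySem.Dict.counter right
  left.foldl (fun total num => total + num * right_counter.getD num 0) 0

-- ===== PORT B =====
-- the two-pointer sweep of Source B: advance the smaller side; on a match, measure the
-- run of equal values in the right list (the inner `while` = takeWhile) and step left
def pbGo : List Int → List Int → Int
  | [], _ => 0
  | _ :: _, [] => 0
  | a :: l, b :: r =>
    if a < b then pbGo l (b :: r)
    else if b < a then pbGo (a :: l) r
    else a * (((b :: r).takeWhile (fun x => x == a)).length : Int) + pbGo l (b :: r)
termination_by l r => l.length + r.length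

def pb_alt (lst : List (Int × Int)) : Int :=
  pbGo (PySem.List.sorted (lst.map (fun x => x.1)) (fun x => x) false)
       (PySem.List.sorted (lst.map (fun x => x.2)) (fun x => x) false)

-- ===== PRECONDITION & SPEC =====
def Spec_pb (lst : List (Int × Int)) (out : Int) : Prop := out = pb_alt lst
instance (lst : List (Int × Int)) (out : Int) : Decidable (Spec_pb lst out) := by unfold Spec_pb; infer_instance

-- ===== CLAIM =====
def Claim_equal_pb : Prop := ∀ (lst : List (Int × Int)), Dom_pb lst → Spec_pb lst (pb lst)

-- ===== LEMMAS AND PROOFS =====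

-- in a sorted list whose elements are all ≥ a, the prefix run of a's is every a
theorem pb_takeWhile_count (a : Int) :
    ∀ (r : List Int), r.Pairwise (· ≤ ·) → (∀ x ∈ r, a ≤ x) →
      ((r.takeWhile (fun x => x == a)).length : Int) = r.count a := by
  intro r
  induction r with
  | nil => simp
  | cons x t ih =>
    intro hp hge
    rcases List.pairwise_cons.mp hp with ⟨hx, ht⟩
    by_cases hxa : x = a
    · subst hxa
      simp only [List.takeWhile_cons, beq_self_eq_true, if_true, List.length_cons,
        List.count_cons_self]
      push_cast
      rw [ih ht (fun y hy => hge y (List.mem_cons_of_mem _ hy))]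
    · have hax : a < x := lt_of_le_of_ne (hge x (List.mem_cons_self)) (Ne.symm hxa)
      have hnot : a ∉ x :: t := by
        intro hmem
        rcases List.mem_cons.mp hmem with h | h
        · exact hxa h.symm
        · have := hx a h; omega
      simp [hxa, List.count_eq_zero.mpr hnot]

-- the sweep on sorted lists computes Σ_{x ∈ l} x * count(r, x)
theorem pbGo_eq_sum :
    ∀ (l r : List Int), l.Pairwise (· ≤ ·) → r.Pairwise (· ≤ ·) →
      pbGo l r = (l.map (fun x => x * (r.count x : Int))).sum := by
  intro l r hl hr
  induction l, r using pbGo.induct with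
  | case1 r => simp [pbGo]
  | case2 a l => simp [pbGo]
  | case3 a l b r hab ih =>
    rcases List.pairwise_cons.mp hl with ⟨ha, hl'⟩
    rcases List.pairwise_cons.mp hr with ⟨hb, _⟩
    have hcnt : ((b :: r).count a : Int) = 0 := by
      have : a ∉ b :: r := by
        intro hmem
        rcases List.mem_cons.mp hmem with h | h
        · omega
        · exact absurd (hb a h) (by omega)
      simp [List.count_eq_zero.mpr this]
    rw [pbGo, if_pos hab, ih hl' hr]
    simp [hcnt]
  | case4 a l b r hab hba ih =>
    rcases List.pairwise_cons.mp hr with ⟨hb, hr'⟩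
    rw [pbGo, if_neg hab, if_pos hba, ih hl hr']
    congr 1
    apply List.map_congr_left
    intro x hx
    have hbx : b ≠ x := by
      rcases List.mem_cons.mp hx with h | h
      · omega
      · have := (List.pairwise_cons.mp hl).1 x h; omega
    simp [hbx]
  | case5 a l b r hab hba ih =>
    rcases List.pairwise_cons.mp hl with ⟨_, hl'⟩
    rcases List.pairwise_cons.mp hr with ⟨hb, _⟩
    have heq : a = b := by omega
    rw [pbGo, if_neg hab, if_neg hba, ih hl' hr]
    have hge : ∀ x ∈ b :: r, a ≤ x := by
      intro x hx
      rcases List.mem_cons.mp hx with h | h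
      · omega
      · have := hb x h; omega
    rw [pb_takeWhile_count a (b :: r) hr hge]
    simp

-- A's Counter pass is the same Σ over the (unsorted) left column
theorem pb_eq_sum (lst : List (Int × Int)) :
    pb lst = ((lst.map (fun x => x.1)).map
      (fun x => x * ((lst.map (fun x => x.2)).count x : Int))).sum := by
  simp only [pb]
  rw [PySem.List.foldl_add
      (g := fun num => num * (PySem.Dict.counter (lst.map (fun x => x.2))).getD num 0)]
  rw [zero_add]
  apply congrArg
  apply List.map_congr_left
  intro x _
  rw [PySem.Dict.getD_counter]

theorem pb_eq_alt (lst : List (Int × Int)) : pb lst = pb_alt lst := by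
  set L := lst.map (fun x => x.1) with hL
  set R := lst.map (fun x => x.2) with hR
  have hpL : (PySem.List.sorted L (fun x => x) false).Perm L := PySem.List.sorted_perm _ _ _
  have hpR : (PySem.List.sorted R (fun x => x) false).Perm R := PySem.List.sorted_perm _ _ _
  have hsL : (PySem.List.sorted L (fun x => x) false).Pairwise (· ≤ ·) := by
    have := PySem.List.sorted_pairwise (xs := L) (key := fun x => x)
    simpa using this
  have hsR : (PySem.List.sorted R (fun x => x) false).Pairwise (· ≤ ·) := by
    have := PySem.List.sorted_pairwise (xs := R) (key := fun x => x)
    simpa using this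
  rw [pb_eq_sum, ← hL, ← hR]
  unfold pb_alt
  rw [← hL, ← hR, pbGo_eq_sum _ _ hsL hsR]
  have hcnt : ∀ x : Int,
      ((PySem.List.sorted R (fun x => x) false).count x : Int) = (R.count x : Int) := by
    intro x; rw [hpR.count_eq]
  calc (L.map (fun x => x * (R.count x : Int))).sum
      = ((PySem.List.sorted L (fun x => x) false).map
          (fun x => x * (R.count x : Int))).sum := ((hpL.map _).sum_eq).symm
    _ = ((PySem.List.sorted L (fun x => x) false).map
          (fun x => x * ((PySem.List.sorted R (fun x => x) false).count x : Int))).sum := by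
          simp only [hcnt]

-- ===== VERDICT =====
theorem pb_spec : Claim_equal_pb := by
  intro lst _
  unfold Spec_pb
  exact pb_eq_alt lst
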